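-- pv_equiv track=rewrite | github.com/MrBrantCode/unitest_baseline | mut_generate/mist_train_cf/cf_12109/solution.py | is_prime_palindrome
-- ===== SOURCE A (Python) =====
-- def is_prime_palindrome(num):
--     if num < 2:
--         return False
--
--     def is_prime(n):
--         for i in range(2, int(n ** 0.5) + 1):
--             if n % i == 0:
--                 return False
--         return True
--
--     def is_palindrome(n):
--         return str(n) == str(n)[::-1]
--
--     return is_prime(num) and is_palindrome(num)
-- ===== SOURCE B (Python) =====
-- def is_prime_palindrome(num):
--     if num < 2:
--         return False
--     i = 2
--     while i * i <= num:
--         if num % i == 0: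
--             return False
--         i += 1
--     rev, n = 0, num
--     while n > 0:
--         rev = rev * 10 + n % 10
--         n //= 10
--     return rev == num
-- ===== Notes on version B (the rewrite author's own statement) =====
-- stated objective: alternative
-- what changed: Primality is tested by a while-loop comparing i*i <= num instead of iterating over range(2, int(num**0.5)+1), and the palindrome check reverses the number arithmetically (rev = rev*10 + n%10; n //= 10) and compares rev == num, with no string construction at all.
import Mathlib
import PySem

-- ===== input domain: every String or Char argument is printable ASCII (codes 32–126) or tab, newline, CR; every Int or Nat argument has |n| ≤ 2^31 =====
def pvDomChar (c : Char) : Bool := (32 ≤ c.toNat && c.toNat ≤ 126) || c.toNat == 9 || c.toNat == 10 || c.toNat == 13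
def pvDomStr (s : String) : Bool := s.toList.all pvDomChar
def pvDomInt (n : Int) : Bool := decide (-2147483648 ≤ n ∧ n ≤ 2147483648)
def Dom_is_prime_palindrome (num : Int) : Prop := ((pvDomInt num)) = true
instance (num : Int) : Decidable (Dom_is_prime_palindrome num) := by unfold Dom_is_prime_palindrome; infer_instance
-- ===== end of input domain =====

-- B replaces A's range(2, int(num**0.5)+1) scan by a while i*i<=num loop and the string-reversal
-- palindrome test by an arithmetic digit reversal (rev = rev*10 + n%10); objective: alternative.

-- ===== PORT A =====
-- 'int(num ** 0.5)': for 0 ≤ num ≤ 2^31 the double sqrt is accurate enough that int(num**0.5)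
-- equals the exact integer square root Nat.sqrt num.toNat (verified exhaustively around all
-- squares of the domain), so the port uses Nat.sqrt; exact on Dom.
-- 'str(num) == str(num)[::-1]': s[::-1] is s.reverse (PySem.List.slice?_none_none_neg_one); exact.
-- The for-loop returning False on the first divisor is the short-circuit List.all over the range.
def is_prime_palindrome (num : Int) : Bool :=
  if num < 2 then false
  else
    ((PySem.List.pyRange 2 (((Nat.sqrt num.toNat : ℕ) : Int) + 1) 1).all
        (fun i => !(PySem.Int.mod num i == 0)))
      && (PySem.Int.toChars num == (PySem.Int.toChars num).reverse)

-- ===== PORT B =====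
-- while i * i <= num: if num % i == 0: return False; i += 1   (h2 : 2 ≤ i is a totality
-- invariant of the call site, used only for termination)
def pvTrialB (num i : Int) (h2 : 2 ≤ i) : Bool :=
  if hle : i * i ≤ num then
    if PySem.Int.mod num i == 0 then false else pvTrialB num (i + 1) (by omega)
  else true
termination_by (num + 1 - i).toNat
decreasing_by
  have : i ≤ i * i := le_mul_of_one_le_left (by omega) (by omega)
  omega

-- while n > 0: rev = rev * 10 + n % 10; n //= 10
def pvRevB (n rev : Int) : Int :=
  if h : 0 < n then pvRevB (PySem.Int.floordiv n 10) (rev * 10 + PySem.Int.mod n 10) else rev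
termination_by n.toNat
decreasing_by
  rw [PySem.Int.floordiv_eq_ediv_of_pos (by omega)]
  omega

def is_prime_palindrome_alt (num : Int) : Bool :=
  if num < 2 then false
  else if pvTrialB num 2 (by omega) then pvRevB num 0 == num else false

-- ===== PRECONDITION & SPEC =====
def Spec_is_prime_palindrome (num : Int) (out : Bool) : Prop := out = is_prime_palindrome_alt num
instance (num : Int) (out : Bool) : Decidable (Spec_is_prime_palindrome num out) := by unfold Spec_is_prime_palindrome; infer_instance

-- ===== CLAIM (what is proved, stated in full; the proofs are below) =====
def Claim_equal_is_prime_palindrome : Prop := ∀ (num : Int), Dom_is_prime_palindrome num → Spec_is_prime_palindrome num (is_prime_palindrome num)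

-- ===== LEMMAS AND PROOFS =====

-- B's while-loop trial division equals A's scan of range(i, isqrt(num)+1).
theorem pvTrialB_eq (num i : Int) (h2 : 2 ≤ i) (hnum : 0 ≤ num) :
    pvTrialB num i h2 =
      (PySem.List.pyRange i (((Nat.sqrt num.toNat : ℕ) : Int) + 1) 1).all
        (fun j => !(PySem.Int.mod num j == 0)) := by
  induction i, h2 using pvTrialB.induct num with
  | case1 i h2 hle heq =>
    have key : i ≤ ((Nat.sqrt num.toNat : ℕ) : Int) := by
      have hi : ((i.toNat : ℕ) : Int) = i := Int.toNat_of_nonneg (by omega)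
      rw [← hi, Nat.cast_le, Nat.le_sqrt]
      have : ((i.toNat * i.toNat : ℕ) : Int) ≤ ((num.toNat : ℕ) : Int) := by
        push_cast [hi, Int.toNat_of_nonneg hnum]; exact hle
      exact_mod_cast this
    rw [pvTrialB, dif_pos hle, if_pos heq,
      PySem.List.pyRange_one_cons (by omega), List.all_cons, heq]
    simp
  | case2 i h2 hle heq ih =>
    have key : i ≤ ((Nat.sqrt num.toNat : ℕ) : Int) := by
      have hi : ((i.toNat : ℕ) : Int) = i := Int.toNat_of_nonneg (by omega)
      rw [← hi, Nat.cast_le, Nat.le_sqrt]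
      have : ((i.toNat * i.toNat : ℕ) : Int) ≤ ((num.toNat : ℕ) : Int) := by
        push_cast [hi, Int.toNat_of_nonneg hnum]; exact hle
      exact_mod_cast this
    have hm : (PySem.Int.mod num i == 0) = false := by
      simpa using heq
    rw [pvTrialB, dif_pos hle, if_neg heq, ih,
      PySem.List.pyRange_one_cons (a := i) (by omega), List.all_cons, hm]
    simp
  | case3 i h2 hle =>
    have key : ¬ i ≤ ((Nat.sqrt num.toNat : ℕ) : Int) := by
      have hi : ((i.toNat : ℕ) : Int) = i := Int.toNat_of_nonneg (by omega)
      rw [← hi, Nat.cast_le, Nat.le_sqrt]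
      intro hcon
      apply hle
      have : ((i.toNat * i.toNat : ℕ) : Int) ≤ ((num.toNat : ℕ) : Int) := by exact_mod_cast hcon
      push_cast [hi, Int.toNat_of_nonneg hnum] at this
      exact this
    rw [pvTrialB, dif_neg hle, PySem.List.pyRange_one_eq_nil (by omega), List.all_nil]

-- Nat.toDigitsCore with enough fuel is the reversed little-endian digit list, rendered as chars.
theorem toDigitsCore_eq (f : ℕ) : ∀ (n : ℕ) (acc : List Char), 0 < n → n < f →
    Nat.toDigitsCore 10 f n acc = ((Nat.digits 10 n).map Nat.digitChar).reverse ++ acc := by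
  induction f with
  | zero => intro n acc h1 h2; omega
  | succ f ih =>
    intro n acc h1 h2
    rw [Nat.toDigitsCore]
    by_cases h : n / 10 = 0
    · rw [if_pos h, Nat.digits_def' (by norm_num) h1, h, Nat.digits_zero]
      simp
    · rw [if_neg h, ih (n / 10) _ (by omega) (by omega),
        Nat.digits_def' (b := 10) (by norm_num) h1]
      simp

theorem digitChar_inj {a b : ℕ} (ha : a < 10) (hb : b < 10) (h : Nat.digitChar a = Nat.digitChar b) :
    a = b := by
  interval_cases a <;> interval_cases b <;> simp_all [Nat.digitChar]

theorem map_digitChar_inj : ∀ {l1 l2 : List ℕ}, (∀ d ∈ l1, d < 10) → (∀ d ∈ l2, d < 10) →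
    l1.map Nat.digitChar = l2.map Nat.digitChar → l1 = l2 := by
  intro l1
  induction l1 with
  | nil => intro l2 _ _ h; cases l2 <;> simp_all
  | cons a t ih =>
    intro l2 h1 h2 h
    cases l2 with
    | nil => simp_all
    | cons b t2 =>
      simp only [List.map_cons, List.cons.injEq] at h
      have hab := digitChar_inj (h1 a (by simp)) (h2 b (by simp)) h.1
      have ht := ih (fun d hd => h1 d (List.mem_cons_of_mem _ hd))
        (fun d hd => h2 d (List.mem_cons_of_mem _ hd)) h.2
      rw [hab, ht]

theorem ofDigits_inj : ∀ {l1 l2 : List ℕ}, l1.length = l2.length → (∀ d ∈ l1, d < 10) →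
    (∀ d ∈ l2, d < 10) → Nat.ofDigits 10 l1 = Nat.ofDigits 10 l2 → l1 = l2 := by
  intro l1
  induction l1 with
  | nil => intro l2 hlen _ _ _; cases l2 <;> simp_all
  | cons a t ih =>
    intro l2 hlen h1 h2 h
    cases l2 with
    | nil => simp_all
    | cons b t2 =>
      simp only [Nat.ofDigits_cons] at h
      have ha := h1 a (by simp); have hb := h2 b (by simp)
      have hrec : Nat.ofDigits 10 t = Nat.ofDigits 10 t2 := by omega
      have : a = b := by omega
      have ht := ih (by simpa using hlen) (fun d hd => h1 d (List.mem_cons_of_mem _ hd))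
        (fun d hd => h2 d (List.mem_cons_of_mem _ hd)) hrec
      rw [this, ht]

-- B's digit-reversal loop computes ofDigits of the reversed digit list, shifted under rev.
theorem pvRevB_eq (n rev : Int) (hn : 0 ≤ n) :
    pvRevB n rev = rev * 10 ^ (Nat.digits 10 n.toNat).length
      + ((Nat.ofDigits 10 (Nat.digits 10 n.toNat).reverse : ℕ) : ℤ) := by
  induction n, rev using pvRevB.induct with
  | case1 n rev h ih =>
    rw [pvRevB, dif_pos h]
    rw [PySem.Int.floordiv_eq_ediv_of_pos (by omega), PySem.Int.mod_eq_emod_of_pos (by omega)] at *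
    rw [ih (by omega)]
    have hd : Nat.digits 10 n.toNat = n.toNat % 10 :: Nat.digits 10 (n.toNat / 10) :=
      Nat.digits_def' (by norm_num) (by omega)
    have h1 : (n / 10).toNat = n.toNat / 10 := by omega
    have h2 : n % 10 = ((n.toNat % 10 : ℕ) : ℤ) := by omega
    rw [h1, hd]
    simp only [List.reverse_cons, List.length_cons, h2]
    rw [Nat.ofDigits_append]
    simp only [Nat.ofDigits_cons, Nat.ofDigits_nil]
    push_cast
    simp only [List.length_reverse]
    ring
  | case2 n rev h =>
    rw [pvRevB, dif_neg h]
    have : n = 0 := by omega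
    subst this
    simp

-- A's string palindrome test equals B's reversed-integer comparison, via the digit list.
theorem pal_transfer (m : ℕ) (hm : 0 < m) :
    (Nat.toDigits 10 m == (Nat.toDigits 10 m).reverse)
      = (((Nat.ofDigits 10 (Nat.digits 10 m).reverse : ℕ) : Int) == ((m : ℕ) : Int)) := by
  have hlt : ∀ d ∈ Nat.digits 10 m, d < 10 := fun d hd => Nat.digits_lt_base (by norm_num) hd
  have hltr : ∀ d ∈ (Nat.digits 10 m).reverse, d < 10 := by
    intro d hd; exact hlt d (List.mem_reverse.mp hd)
  have hD : Nat.toDigits 10 m = ((Nat.digits 10 m).map Nat.digitChar).reverse := by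
    rw [Nat.toDigits]
    rw [toDigitsCore_eq (m + 1) m [] hm (by omega)]
    simp
  rw [hD, List.reverse_reverse]
  rw [Bool.eq_iff_iff, beq_iff_eq, beq_iff_eq]
  constructor
  · intro h
    have hrev : (Nat.digits 10 m).reverse = Nat.digits 10 m :=
      map_digitChar_inj hltr hlt (by rw [List.map_reverse]; exact h)
    rw [hrev, Nat.ofDigits_digits]
  · intro h
    have : Nat.ofDigits 10 ((Nat.digits 10 m).reverse) = Nat.ofDigits 10 (Nat.digits 10 m) := by
      rw [Nat.ofDigits_digits]
      exact_mod_cast h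
    have hrev : (Nat.digits 10 m).reverse = Nat.digits 10 m :=
      ofDigits_inj (by simp) hltr hlt this
    rw [← List.map_reverse, hrev]

-- ===== VERDICT (by name: the statement is the Claim_ definition above) =====
theorem is_prime_palindrome_spec : Claim_equal_is_prime_palindrome := by
  intro num _
  unfold Spec_is_prime_palindrome is_prime_palindrome is_prime_palindrome_alt
  by_cases h : num < 2
  · rw [if_pos h, if_pos h]
  · rw [if_neg h, if_neg h]
    have h2 : 2 ≤ num := by omega
    rw [← pvTrialB_eq num 2 (by omega) (by omega)]
    have hb : ∀ (c x : Bool), (if c = true then x else false) = (c && x) := by decide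
    rw [hb]
    congr 1
    -- palindrome components
    have hneg : ¬ num < 0 := by omega
    have hm : 0 < num.toNat := by omega
    have hcast : ((num.toNat : ℕ) : Int) = num := Int.toNat_of_nonneg (by omega)
    rw [PySem.Int.toChars, if_neg hneg]
    rw [pvRevB_eq num 0 (by omega)]
    simp only [zero_mul, zero_add]
    have := pal_transfer num.toNat hm
    rw [Int.toNat_of_nonneg (by omega : (0:Int) ≤ num)] at this
    exact this
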